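-- pv_equiv track=rewrite | github.com/exportPipe/2D_Computer_Vision | a1/a1.py | compute_lut
-- ===== SOURCE A (Python) =====
-- def compute_lut(a):
--     lut = {}
--     for i in range(256):
--         value = i + a
--         if value > 255:
--             value = 255
--         if value < 0:
--             value = 0
--         lut[i] = value
--     return lut
-- ===== SOURCE B (Python) =====
-- def compute_lut(a):
--     # boundary computation instead of per-entry branching:
--     # entries below L clamp to 0, entries from H on clamp to 255, middle is linear
--     L = min(max(-a, 0), 256)
--     H = min(max(256 - a, 0), 256)
--     return {**{i: 0 for i in range(0, L)},
--             **{i: i + a for i in range(L, H)},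
--             **{i: 255 for i in range(H, 256)}}
-- ===== Notes on version B (the rewrite author's own statement) =====
-- stated objective: alternative
-- what changed: Replaces the per-entry clamp branching inside the loop over the table by computing the two clamp breakpoints L and H once and filling the table in three contiguous range passes (constant zero, linear i+a, constant cap).
import Mathlib
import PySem

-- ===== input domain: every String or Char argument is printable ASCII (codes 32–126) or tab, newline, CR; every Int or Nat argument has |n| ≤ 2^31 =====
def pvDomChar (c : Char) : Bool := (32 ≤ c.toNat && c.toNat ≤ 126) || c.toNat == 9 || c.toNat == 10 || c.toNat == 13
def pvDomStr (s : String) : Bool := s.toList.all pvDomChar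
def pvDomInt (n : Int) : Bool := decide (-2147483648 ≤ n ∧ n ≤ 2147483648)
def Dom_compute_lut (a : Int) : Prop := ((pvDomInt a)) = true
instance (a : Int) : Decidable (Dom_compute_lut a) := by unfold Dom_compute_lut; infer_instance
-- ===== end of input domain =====

-- B replaces per-entry clamp branching by computing the two clamp breakpoints once
-- and filling the table in three contiguous range passes (alternative decomposition, same cost).


-- ===== PORT A =====
def compute_lut (a : Int) : List (Int × Int) :=
  ((PySem.List.pyRange 0 256 1).foldl
    (fun (lut : PySem.Dict Int Int) i =>
      let value := i + a
      let value := if value > 255 then (255 : Int) else value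
      let value := if value < 0 then (0 : Int) else value
      lut.insert i value)
    PySem.Dict.empty).items

-- ===== PORT B =====
def compute_lut_alt (a : Int) : List (Int × Int) :=
  let L := min (max (-a) 0) 256
  let H := min (max (256 - a) 0) 256
  (PySem.List.pyRange 0 L 1).map (fun i => (i, (0 : Int)))
    ++ (PySem.List.pyRange L H 1).map (fun i => (i, i + a))
    ++ (PySem.List.pyRange H 256 1).map (fun i => (i, (255 : Int)))

-- ===== PRECONDITION & SPEC =====
def Spec_compute_lut (a : Int) (out : List (Int × Int)) : Prop := out = compute_lut_alt a
instance (a : Int) (out : List (Int × Int)) : Decidable (Spec_compute_lut a out) := by unfold Spec_compute_lut; infer_instance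

-- ===== CLAIM (what is proved, stated in full; the proofs are below) =====
def Claim_equal_compute_lut : Prop := ∀ (a : Int), Dom_compute_lut a → Spec_compute_lut a (compute_lut a)

-- ===== LEMMAS AND PROOFS =====

-- A's loop over 256 fresh distinct keys appends one entry per key.
theorem compute_lut_eq_map (a : Int) :
    compute_lut a = (PySem.List.pyRange 0 256 1).map
      (fun i => (i,
        let value := i + a
        let value := if value > 255 then (255 : Int) else value
        if value < 0 then (0 : Int) else value)) := by
  unfold compute_lut
  rw [PySem.Dict.items_foldl_insert_fresh (k := fun i => i)
        (v := fun i =>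
          let value := i + a
          let value := if value > 255 then (255 : Int) else value
          if value < 0 then (0 : Int) else value)]
  · rfl
  · intro x _; rfl
  · simpa using PySem.List.nodup_pyRange_one 0 256

-- ===== VERDICT (by name: the statement is the Claim_ definition above) =====
theorem compute_lut_spec : Claim_equal_compute_lut := by
  intro a _
  show compute_lut a = compute_lut_alt a
  rw [compute_lut_eq_map]
  unfold compute_lut_alt
  set L := min (max (-a) 0) 256 with hL
  set H := min (max (256 - a) 0) 256 with hH
  have e1 : (PySem.List.pyRange 0 L 1).map
      (fun i => (i,
        let value := i + a
        let value := if value > 255 then (255 : Int) else value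
        if value < 0 then (0 : Int) else value))
      = (PySem.List.pyRange 0 L 1).map (fun i => (i, (0 : Int))) := by
    apply List.map_congr_left
    intro i hi
    rw [PySem.List.mem_pyRange_one] at hi
    simp only []
    split_ifs <;> simp only [Prod.mk.injEq, true_and] <;> omega
  have e2 : (PySem.List.pyRange L H 1).map
      (fun i => (i,
        let value := i + a
        let value := if value > 255 then (255 : Int) else value
        if value < 0 then (0 : Int) else value))
      = (PySem.List.pyRange L H 1).map (fun i => (i, i + a)) := by
    apply List.map_congr_left
    intro i hi
    rw [PySem.List.mem_pyRange_one] at hi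
    simp only []
    split_ifs <;> simp only [Prod.mk.injEq, true_and] <;> omega
  have e3 : (PySem.List.pyRange H 256 1).map
      (fun i => (i,
        let value := i + a
        let value := if value > 255 then (255 : Int) else value
        if value < 0 then (0 : Int) else value))
      = (PySem.List.pyRange H 256 1).map (fun i => (i, (255 : Int))) := by
    apply List.map_congr_left
    intro i hi
    rw [PySem.List.mem_pyRange_one] at hi
    simp only []
    split_ifs <;> simp only [Prod.mk.injEq, true_and] <;> omega
  rw [PySem.List.pyRange_one_append 0 L 256 (by omega) (by omega),
      PySem.List.pyRange_one_append L H 256 (by omega) (by omega),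
      List.map_append, List.map_append, e1, e2, e3]
  simp [List.append_assoc]
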